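-- pv_equiv track=rewrite | github.com/JackKing805/WorkFlowTool | python_detector/detect_icons.py | fill_holes
-- ===== SOURCE A (Python) =====
-- from collections import deque
-- from typing import Any, Dict, Iterable, List, Optional, Sequence, Tuple
--
-- def fill_holes(mask: Sequence[bool], width: int, height: int) -> List[bool]:
--     if width <= 0 or height <= 0:
--         return list(mask)
--     visited = bytearray(width * height)
--     queue: deque[int] = deque()
--
--     def enqueue(index: int) -> None:
--         if visited[index] or mask[index]:
--             return
--         visited[index] = 1
--         queue.append(index)
--
--     for x in range(width):
--         enqueue(x)
--         enqueue((height - 1) * width + x)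
--     for y in range(height):
--         enqueue(y * width)
--         enqueue(y * width + width - 1)
--
--     while queue:
--         index = queue.popleft()
--         x = index % width
--         y = index // width
--         for nx, ny in neighbors4(x, y, width, height):
--             next_index = ny * width + nx
--             if not visited[next_index] and not mask[next_index]:
--                 visited[next_index] = 1
--                 queue.append(next_index)
--
--     filled = list(mask)
--     for index, value in enumerate(mask):
--         if not value and not visited[index]:
--             filled[index] = True
--     return filled
--
-- def neighbors4(x: int, y: int, width: int, height: int) -> Iterable[Tuple[int, int]]:
--     if x > 0:
--         yield x - 1, y
--     if x + 1 < width: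
--         yield x + 1, y
--     if y > 0:
--         yield x, y - 1
--     if y + 1 < height:
--         yield x, y + 1
-- ===== SOURCE B (Python) =====
-- def _open_to_border(reach, i, width, height):
--     x = i % width
--     y = i // width
--     if x == 0 or x == width - 1 or y == 0 or y == height - 1:
--         return True
--     return reach[i - 1] or reach[i + 1] or reach[i - width] or reach[i + width]
--
--
-- def fill_holes(mask, width, height):
--     # Synchronous fixpoint relaxation: no queue/stack; sweep the grid until the
--     # set of border-connected background cells stops growing, then fill the rest.
--     if width <= 0 or height <= 0:
--         return list(mask)
--     n = width * height
--     reach = [False] * n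
--     while True:
--         new = [reach[i] or (not mask[i] and _open_to_border(reach, i, width, height))
--                for i in range(n)]
--         if new == reach:
--             break
--         reach = new
--     filled = list(mask)
--     for i in range(n):
--         if not mask[i] and not reach[i]:
--             filled[i] = True
--     return filled
-- ===== Notes on version B (the rewrite author's own statement) =====
-- stated objective: alternative
-- what changed: Replaced the border-seeded BFS with an explicit deque/visited bytearray by a queue-free synchronous fixpoint relaxation: sweep the whole grid, growing the set of border-connected background cells, until it stabilizes, then fill every background cell left outside it.
import Mathlib
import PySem

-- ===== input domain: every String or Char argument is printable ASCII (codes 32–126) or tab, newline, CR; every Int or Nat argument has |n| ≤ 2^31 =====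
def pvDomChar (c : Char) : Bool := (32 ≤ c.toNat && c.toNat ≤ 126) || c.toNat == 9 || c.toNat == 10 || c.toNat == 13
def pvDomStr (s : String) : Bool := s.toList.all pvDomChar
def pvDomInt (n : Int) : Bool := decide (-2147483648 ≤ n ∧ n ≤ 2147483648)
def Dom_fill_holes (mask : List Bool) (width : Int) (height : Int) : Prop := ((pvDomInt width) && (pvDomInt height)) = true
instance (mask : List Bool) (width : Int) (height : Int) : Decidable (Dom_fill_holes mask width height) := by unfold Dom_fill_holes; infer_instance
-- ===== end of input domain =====

-- ===== PORT A =====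
-- Literal port of A's border-seeded BFS. Python indexes visited/mask with
-- always-nonnegative in-range indices (guaranteed by Pre_); out-of-range
-- accesses raise in Python and are excluded by Pre_fill_holes.
def neighbors4 (x y width height : Int) : List (Int × Int) :=
  (if x > 0 then [(x - 1, y)] else []) ++
  (if x + 1 < width then [(x + 1, y)] else []) ++
  (if y > 0 then [(x, y - 1)] else []) ++
  (if y + 1 < height then [(x, y + 1)] else [])

def fhEnqueue (mask : List Bool) (st : List Bool × List Int) (index : Int) :
    List Bool × List Int :=
  if PySem.List.pyGetD st.1 index false || PySem.List.pyGetD mask index false then st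
  else (st.1.set index.toNat true, st.2 ++ [index])

def fhSeeds (mask : List Bool) (width height : Int) : List Bool × List Int :=
  let st0 : List Bool × List Int := (List.replicate (width * height).toNat false, [])
  let st1 := (PySem.List.pyRange 0 width 1).foldl
    (fun st x => fhEnqueue mask (fhEnqueue mask st x) ((height - 1) * width + x)) st0
  (PySem.List.pyRange 0 height 1).foldl
    (fun st y => fhEnqueue mask (fhEnqueue mask st (y * width)) (y * width + width - 1)) st1

def fhExpand (mask : List Bool) (width height : Int) (index : Int)
    (st : List Bool × List Int) : List Bool × List Int :=
  let x := PySem.Int.mod index width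
  let y := PySem.Int.floordiv index width
  (neighbors4 x y width height).foldl
    (fun st p =>
      let next := p.2 * width + p.1
      if !PySem.List.pyGetD st.1 next false && !PySem.List.pyGetD mask next false then
        (st.1.set next.toNat true, st.2 ++ [next])
      else st) st

-- fuel makes the BFS loop structurally total; Pre_ guarantees it suffices.
def fhBFS (mask : List Bool) (width height : Int) :
    Nat → List Bool × List Int → List Bool
  | _, (visited, []) => visited
  | 0, (visited, _ :: _) => visited
  | fuel + 1, (visited, index :: rest) =>
      fhBFS mask width height fuel (fhExpand mask width height index (visited, rest))

def fill_holes (mask : List Bool) (width : Int) (height : Int) : List Bool :=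
  if width ≤ 0 || height ≤ 0 then mask
  else
    let st := fhSeeds mask width height
    let visited := fhBFS mask width height (2 * (width * height).toNat + st.2.length) st
    (PySem.List.enumerate mask).foldl
      (fun filled p =>
        if !p.2 && !PySem.List.pyGetD visited p.1 false then filled.set p.1.toNat true
        else filled) mask

-- ===== PORT B =====
-- Literal port of B's synchronous fixpoint relaxation (Source B); the Python
-- 'while True' loop changes its state at most n times, so fuel n+1 is exact.
def fhOpen (reach : List Bool) (i width height : Int) : Bool :=
  let x := PySem.Int.mod i width
  let y := PySem.Int.floordiv i width
  if x == 0 || x == width - 1 || y == 0 || y == height - 1 then true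
  else
    PySem.List.pyGetD reach (i - 1) false || PySem.List.pyGetD reach (i + 1) false ||
    PySem.List.pyGetD reach (i - width) false || PySem.List.pyGetD reach (i + width) false

def fhSweep (mask reach : List Bool) (width height : Int) (n : Int) : List Bool :=
  (PySem.List.pyRange 0 n 1).map
    (fun i => PySem.List.pyGetD reach i false ||
      (!PySem.List.pyGetD mask i false && fhOpen reach i width height))

def fhIter (mask : List Bool) (width height : Int) (n : Int) :
    Nat → List Bool → List Bool
  | 0, reach => reach
  | fuel + 1, reach =>
      let new := fhSweep mask reach width height n
      if new == reach then reach else fhIter mask width height n fuel new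

def fill_holes_alt (mask : List Bool) (width : Int) (height : Int) : List Bool :=
  if width ≤ 0 || height ≤ 0 then mask
  else
    let n := width * height
    let reach := fhIter mask width height n (n.toNat + 1) (List.replicate n.toNat false)
    (PySem.List.pyRange 0 n 1).foldl
      (fun filled i =>
        if !PySem.List.pyGetD mask i false && !PySem.List.pyGetD reach i false then
          filled.set i.toNat true
        else filled) mask

-- ===== PRECONDITION & SPEC =====
-- Pre_ excludes exactly the inputs where A raises IndexError: a positive grid
-- whose mask is shorter than width*height or has a False entry at index ≥ width*height.
def Pre_fill_holes (mask : List Bool) (width : Int) (height : Int) : Prop :=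
  width ≤ 0 ∨ height ≤ 0 ∨
    ((width * height).toNat ≤ mask.length ∧
      ∀ b ∈ mask.drop (width * height).toNat, b = true)
instance (mask : List Bool) (width : Int) (height : Int) :
    Decidable (Pre_fill_holes mask width height) := by unfold Pre_fill_holes; infer_instance

def pvWitness_fill_holes : List Bool × Int × Int :=
  ([true, true, true, true, false, true, true, true, true], 3, 3)

def Spec_fill_holes (mask : List Bool) (width : Int) (height : Int) (out : List Bool) : Prop := out = fill_holes_alt mask width height
instance (mask : List Bool) (width : Int) (height : Int) (out : List Bool) : Decidable (Spec_fill_holes mask width height out) := by unfold Spec_fill_holes; infer_instance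

-- ===== CLAIM (what is proved, stated in full; the proofs are below) =====
def Claim_equal_fill_holes : Prop := ∀ (mask : List Bool) (width : Int) (height : Int), Dom_fill_holes mask width height → Pre_fill_holes mask width height → Spec_fill_holes mask width height (fill_holes mask width height)

-- ===== LEMMAS AND PROOFS =====

-- small Bool-list utilities
theorem pvGetD_set_self (xs : List Bool) (k : Nat) (b : Bool) (hk : k < xs.length) :
    (xs.set k b).getD k false = b := by
  rw [List.getD_eq_getElem _ _ (by simpa using hk)]
  exact List.getElem_set_self _

theorem pvGetD_set_ne (xs : List Bool) (k j : Nat) (b : Bool) (h : k ≠ j) :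
    (xs.set k b).getD j false = xs.getD j false := by
  by_cases hj : j < xs.length
  · rw [List.getD_eq_getElem _ _ (by simpa using hj), List.getD_eq_getElem _ _ hj]
    exact List.getElem_set_ne h _
  · rw [List.getD_eq_default _ _ (by simpa using Nat.le_of_not_lt hj),
        List.getD_eq_default _ _ (Nat.le_of_not_lt hj)]

theorem pvGetD_set_true (xs : List Bool) (k j : Nat) (h : xs.getD j false = true) :
    (xs.set k true).getD j false = true := by
  by_cases hkj : k = j
  · subst hkj
    by_cases hk : k < xs.length
    · exact pvGetD_set_self xs k true hk
    · rw [List.set_eq_of_length_le (Nat.le_of_not_lt hk)]; exact h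
  · rw [pvGetD_set_ne xs k j true hkj]; exact h

theorem pvCount_false_set (xs : List Bool) : ∀ (k : Nat), k < xs.length →
    xs.getD k false = false → (xs.set k true).count false + 1 = xs.count false := by
  induction xs with
  | nil => intro k hk; simp at hk
  | cons x t ih =>
    intro k hk hx
    cases k with
    | zero =>
      simp only [List.getD_cons_zero] at hx
      subst hx
      simp
    | succ n =>
      simp only [List.getD_cons_succ] at hx
      have := ih n (by simpa using Nat.lt_of_succ_lt_succ hk) hx
      simp only [List.set, List.count_cons]
      cases x <;> simp_all

-- generic foldl helpers
theorem pvFoldl_pres {σ α : Type} (f : σ → α → σ) (P : σ → Prop) (l : List α) :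
    ∀ (s0 : σ), (∀ s a, a ∈ l → P s → P (f s a)) → P s0 → P (l.foldl f s0) := by
  induction l with
  | nil => intro s0 _ h; simpa using h
  | cons a t ih =>
    intro s0 hpres h0
    exact ih (f s0 a) (fun s b hb hs => hpres s b (List.mem_cons_of_mem a hb) hs)
      (hpres s0 a (List.mem_cons_self) h0)

theorem pvFoldl_estab {σ α : Type} (f : σ → α → σ) (I P : σ → Prop) (l : List α) :
    ∀ (s0 : σ), (∀ s a, I s → I (f s a)) → (∀ s a, P s → P (f s a)) → I s0 →
    ∀ a ∈ l, (∀ s, I s → P (f s a)) → P (l.foldl f s0) := by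
  induction l with
  | nil => intro s0 _ _ _ a ha; simp at ha
  | cons b t ih =>
    intro s0 hI hP hI0 a ha hest
    rcases List.mem_cons.mp ha with rfl | ha
    · exact pvFoldl_pres f P t (f s0 a) (fun s c _ => hP s c) (hest s0 hI0)
    · exact ih (f s0 b) hI hP (hI s0 b hI0) a ha hest

-- grid adjacency / border, in flat-index Nat form
def adjN (w' : Nat) (i j : Nat) : Prop :=
  (j = i + 1 ∧ (i + 1) % w' ≠ 0) ∨ (i = j + 1 ∧ (j + 1) % w' ≠ 0) ∨ (j = i + w') ∨ (i = j + w')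

theorem adjN_symm {w' i j : Nat} (h : adjN w' i j) : adjN w' j i := by
  unfold adjN at *; tauto

def borderN (w' h' : Nat) (i : Nat) : Prop :=
  i % w' = 0 ∨ i % w' = w' - 1 ∨ i / w' = 0 ∨ i / w' = h' - 1

-- border-connected background cells (least such set)
inductive GR (mask : List Bool) (w' h' : Nat) : Nat → Prop
  | border (i : Nat) (hi : i < w' * h') (hb : mask.getD i false = false)
      (hbord : borderN w' h' i) : GR mask w' h' i
  | step (i j : Nat) (hgr : GR mask w' h' i) (hj : j < w' * h')
      (hbg : mask.getD j false = false) (ha : adjN w' i j) : GR mask w' h' j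

theorem GR_lt {mask : List Bool} {w' h' k : Nat} (h : GR mask w' h' k) : k < w' * h' := by
  cases h with
  | border i hi _ _ => exact hi
  | step i j _ hj _ _ => exact hj

-- ===== B-side: the fixpoint iteration computes exactly the GR set =====

theorem pvCast_WW (w' h' : Nat) : ((↑w' * ↑h' : Int) - 0) = ((w' * h' : Nat) : Int) := by
  push_cast; ring

theorem pvSweep_length (mask s : List Bool) (w' h' : Nat) :
    (fhSweep mask s ↑w' ↑h' (↑w' * ↑h')).length = w' * h' := by
  unfold fhSweep
  rw [List.length_map, PySem.List.length_pyRange_one, pvCast_WW, Int.toNat_natCast]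

theorem pvSweep_getD (mask s : List Bool) (w' h' : Nat) (k : Nat) (hk : k < w' * h') :
    (fhSweep mask s ↑w' ↑h' (↑w' * ↑h')).getD k false
      = (s.getD k false || (!mask.getD k false && fhOpen s ↑k ↑w' ↑h')) := by
  unfold fhSweep
  rw [PySem.List.pyRange_one, pvCast_WW, Int.toNat_natCast, List.map_map,
      PySem.List.getD_map_range _ _ _ _ hk]
  simp [PySem.List.pyGetD_natCast]

theorem pvOpen_border (s : List Bool) (w' h' k : Nat) (hw' : 0 < w') (hh' : 0 < h')
    (hb : borderN w' h' k) : fhOpen s ↑k ↑w' ↑h' = true := by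
  unfold fhOpen
  simp only [PySem.Int.mod_natCast, PySem.Int.floordiv_natCast]
  have e1 : ((w' : Int) - 1) = ((w' - 1 : Nat) : Int) := by omega
  have e2 : ((h' : Int) - 1) = ((h' - 1 : Nat) : Int) := by omega
  rcases hb with h | h | h | h <;> simp [e1, e2, h]

theorem pvOpen_interior (s : List Bool) (w' h' k : Nat) (hw' : 0 < w') (hh' : 0 < h')
    (hk : k < w' * h') (hnb : ¬ borderN w' h' k) (hs : s.length = w' * h') :
    (fhOpen s ↑k ↑w' ↑h' = true) ↔
      ∃ j, j < w' * h' ∧ adjN w' k j ∧ s.getD j false = true := by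
  have hdm := Nat.div_add_mod k w'
  have hx0 : k % w' ≠ 0 := fun h => hnb (Or.inl h)
  have hx1 : k % w' ≠ w' - 1 := fun h => hnb (Or.inr (Or.inl h))
  have hy0 : k / w' ≠ 0 := fun h => hnb (Or.inr (Or.inr (Or.inl h)))
  have hy1 : k / w' ≠ h' - 1 := fun h => hnb (Or.inr (Or.inr (Or.inr h)))
  have hxlt : k % w' < w' := Nat.mod_lt _ hw'
  have hylt : k / w' < h' := by
    rw [Nat.div_lt_iff_lt_mul hw']
    exact (Nat.mul_comm w' h') ▸ hk
  obtain ⟨x, hxeq⟩ : ∃ x, k % w' = x := ⟨_, rfl⟩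
  obtain ⟨q, hqeq⟩ : ∃ q, k / w' = q := ⟨_, rfl⟩
  rw [hxeq] at hdm hx0 hx1 hxlt
  rw [hqeq] at hdm hy0 hy1 hylt
  have hq1 : w' * 1 ≤ w' * q := by
    have h1 : 1 ≤ q := Nat.one_le_iff_ne_zero.mpr hy0
    exact Nat.mul_le_mul (Nat.le_refl w') h1
  have hq2 : w' * (q + 1) ≤ w' * (h' - 1) := by
    have h1 : q + 1 ≤ h' - 1 := by omega
    exact Nat.mul_le_mul (Nat.le_refl w') h1
  have hq3 : w' * (h' - 1) + w' = w' * h' := by rw [← Nat.mul_succ]; congr 1; omega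
  have hmulq : w' * (q + 1) = w' * q + w' := by ring
  have hkw : w' ≤ k := by omega
  have hkup : k + w' < w' * h' := by omega
  have hkr : k + 1 < w' * h' := by omega
  have hmod1 : (k + 1) % w' = x + 1 := by
    have h1 : k + 1 = w' * q + (x + 1) := by omega
    rw [h1, Nat.mul_add_mod]
    exact Nat.mod_eq_of_lt (by omega)
  -- the four reads as Nat casts
  have c1 : ((k : Int) - 1) = ((k - 1 : Nat) : Int) := by omega
  have c2 : ((k : Int) + 1) = ((k + 1 : Nat) : Int) := by omega
  have c3 : ((k : Int) - (w' : Int)) = ((k - w' : Nat) : Int) := by omega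
  have c4 : ((k : Int) + (w' : Int)) = ((k + w' : Nat) : Int) := by omega
  have e1 : ((w' : Int) - 1) = ((w' - 1 : Nat) : Int) := by omega
  have e2 : ((h' : Int) - 1) = ((h' - 1 : Nat) : Int) := by omega
  have b1 : ¬ (((k % w' : Nat) : Int) = ((0 : Nat) : Int)) := by
    rw [hxeq]; exact_mod_cast hx0
  have b2 : ¬ (((k % w' : Nat) : Int) = ((w' - 1 : Nat) : Int)) := by
    rw [hxeq]; exact_mod_cast hx1
  have b3 : ¬ (((k / w' : Nat) : Int) = ((0 : Nat) : Int)) := by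
    rw [hqeq]; exact_mod_cast hy0
  have b4 : ¬ (((k / w' : Nat) : Int) = ((h' - 1 : Nat) : Int)) := by
    rw [hqeq]; exact_mod_cast hy1
  have hcond : fhOpen s ↑k ↑w' ↑h'
      = (s.getD (k - 1) false || s.getD (k + 1) false ||
         s.getD (k - w') false || s.getD (k + w') false) := by
    have hif : ((((k % w' : Nat) : Int) == 0) || (((k % w' : Nat) : Int) == (w' : Int) - 1) ||
        (((k / w' : Nat) : Int) == 0) || (((k / w' : Nat) : Int) == (h' : Int) - 1)) = false := by
      rw [e1, e2]
      simp only [Bool.or_eq_false_iff, beq_eq_false_iff_ne, ne_eq]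
      refine ⟨⟨⟨fun h => b1 (by simpa using h), b2⟩, fun h => b3 (by simpa using h)⟩, b4⟩
    unfold fhOpen
    simp only [PySem.Int.mod_natCast, PySem.Int.floordiv_natCast]
    rw [if_neg (by rw [hif]; exact Bool.false_ne_true)]
    simp only [c1, c2, c3, c4, PySem.List.pyGetD_natCast]
  rw [hcond]
  simp only [Bool.or_eq_true]
  constructor
  · intro h
    rcases h with ((h | h) | h) | h
    · exact ⟨k - 1, by omega, Or.inr (Or.inl ⟨by omega, by
        have hsub : k - 1 + 1 = k := by omega
        rw [hsub, hxeq]; exact hx0⟩), h⟩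
    · exact ⟨k + 1, hkr, Or.inl ⟨rfl, by rw [hmod1]; omega⟩, h⟩
    · exact ⟨k - w', by omega, Or.inr (Or.inr (Or.inr (by omega))), h⟩
    · exact ⟨k + w', hkup, Or.inr (Or.inr (Or.inl rfl)), h⟩
  · rintro ⟨j, hj, hadj, hsj⟩
    rcases hadj with ⟨rfl, _⟩ | ⟨hkj, _⟩ | rfl | hkj
    · exact Or.inl (Or.inl (Or.inr hsj))
    · obtain rfl : j = k - 1 := by omega
      exact Or.inl (Or.inl (Or.inl hsj))
    · exact Or.inr hsj
    · obtain rfl : j = k - w' := by omega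
      exact Or.inl (Or.inr hsj)

theorem pvCount_lt (xs : List Bool) : ∀ (ys : List Bool), xs.length = ys.length →
    (∀ k, xs.getD k false = true → ys.getD k false = true) →
    xs.count true ≤ ys.count true ∧ (xs ≠ ys → xs.count true < ys.count true) := by
  induction xs with
  | nil =>
    intro ys hlen _
    cases ys with
    | nil => exact ⟨Nat.le_refl _, fun h => absurd rfl h⟩
    | cons y u => simp at hlen
  | cons x t ih =>
    intro ys hlen hpt
    cases ys with
    | nil => simp at hlen
    | cons y u =>
      have hlen' : t.length = u.length := by simpa using hlen
      have hpt' : ∀ k, t.getD k false = true → u.getD k false = true := by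
        intro k hk
        have := hpt (k + 1) (by simpa using hk)
        simpa using this
      obtain ⟨hle, hlt⟩ := ih u hlen' hpt'
      have hhead : x = true → y = true := fun hx => by
        have := hpt 0 (by simpa using hx); simpa using this
      cases x <;> cases y
      · have hc1 : List.count true (false :: t) = List.count true t := by simp
        have hc2 : List.count true (false :: u) = List.count true u := by simp
        refine ⟨by omega, fun hne => ?_⟩
        have hne' : t ≠ u := fun h => hne (by rw [h])
        have := hlt hne'; omega
      · have hc1 : List.count true (false :: t) = List.count true t := by simp
        have hc2 : List.count true (true :: u) = List.count true u + 1 := by simp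
        exact ⟨by omega, fun _ => by omega⟩
      · exact absurd (hhead rfl) (by simp)
      · have hc1 : List.count true (true :: t) = List.count true t + 1 := by simp
        have hc2 : List.count true (true :: u) = List.count true u + 1 := by simp
        refine ⟨by omega, fun hne => ?_⟩
        have hne' : t ≠ u := fun h => hne (by rw [h])
        have := hlt hne'; omega

theorem pvIter_props (mask : List Bool) (w' h' : Nat) (P : List Bool → Prop)
    (hP : ∀ s, s.length = w' * h' → P s → P (fhSweep mask s ↑w' ↑h' (↑w' * ↑h'))) :
    ∀ (fuel : Nat) (s : List Bool), s.length = w' * h' → P s →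
    w' * h' + 1 ≤ fuel + s.count true →
    (fhIter mask ↑w' ↑h' (↑w' * ↑h') fuel s).length = w' * h' ∧
    P (fhIter mask ↑w' ↑h' (↑w' * ↑h') fuel s) ∧
    (∀ k, s.getD k false = true →
      (fhIter mask ↑w' ↑h' (↑w' * ↑h') fuel s).getD k false = true) ∧
    fhSweep mask (fhIter mask ↑w' ↑h' (↑w' * ↑h') fuel s) ↑w' ↑h' (↑w' * ↑h')
      = fhIter mask ↑w' ↑h' (↑w' * ↑h') fuel s := by
  intro fuel
  induction fuel with
  | zero =>
    intro s hs hPs hfuel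
    have := List.count_le_length (a := true) (l := s)
    omega
  | succ fuel ih =>
    intro s hs hPs hfuel
    by_cases hbe : (fhSweep mask s ↑w' ↑h' (↑w' * ↑h') == s) = true
    · have hfix : fhSweep mask s ↑w' ↑h' (↑w' * ↑h') = s := eq_of_beq hbe
      have hres : fhIter mask ↑w' ↑h' (↑w' * ↑h') (fuel + 1) s
          = if (fhSweep mask s ↑w' ↑h' (↑w' * ↑h') == s) = true then s
            else fhIter mask ↑w' ↑h' (↑w' * ↑h') fuel
              (fhSweep mask s ↑w' ↑h' (↑w' * ↑h')) := rfl
      rw [hres, if_pos hbe]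
      exact ⟨hs, hPs, fun k hk => hk, hfix⟩
    · have hne : fhSweep mask s ↑w' ↑h' (↑w' * ↑h') ≠ s := by
        intro h; exact hbe (by rw [h]; exact BEq.rfl)
      have hres : fhIter mask ↑w' ↑h' (↑w' * ↑h') (fuel + 1) s
          = fhIter mask ↑w' ↑h' (↑w' * ↑h') fuel (fhSweep mask s ↑w' ↑h' (↑w' * ↑h')) := by
        have h0 : fhIter mask ↑w' ↑h' (↑w' * ↑h') (fuel + 1) s
            = if (fhSweep mask s ↑w' ↑h' (↑w' * ↑h') == s) = true then s
              else fhIter mask ↑w' ↑h' (↑w' * ↑h') fuel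
                (fhSweep mask s ↑w' ↑h' (↑w' * ↑h')) := rfl
        rw [h0, if_neg hbe]
      have hmono : ∀ k, s.getD k false = true →
          (fhSweep mask s ↑w' ↑h' (↑w' * ↑h')).getD k false = true := by
        intro k hk
        have hklt : k < w' * h' := by
          by_contra hnk
          rw [List.getD_eq_default _ _ (by omega)] at hk
          exact Bool.false_ne_true hk
        rw [pvSweep_getD mask s w' h' k hklt, hk]; rfl
      have hcnt := pvCount_lt s (fhSweep mask s ↑w' ↑h' (↑w' * ↑h'))
        (by rw [pvSweep_length, hs]) hmono
      have hlt : s.count true < (fhSweep mask s ↑w' ↑h' (↑w' * ↑h')).count true :=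
        hcnt.2 (fun h => hne h.symm)
      obtain ⟨h1, h2, h3, h4⟩ := ih (fhSweep mask s ↑w' ↑h' (↑w' * ↑h'))
        (pvSweep_length mask s w' h') (hP s hs hPs) (by omega)
      rw [hres]
      exact ⟨h1, h2, fun k hk => h3 k (hmono k hk), h4⟩

theorem pvFix_complete (mask r : List Bool) (w' h' : Nat) (hw' : 0 < w') (hh' : 0 < h')
    (hr : r.length = w' * h')
    (hfix : fhSweep mask r ↑w' ↑h' (↑w' * ↑h') = r) :
    ∀ k, GR mask w' h' k → r.getD k false = true := by
  intro k hk
  induction hk with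
  | border i hi hb hbord =>
    have h := pvSweep_getD mask r w' h' i hi
    rw [hfix, hb, pvOpen_border r w' h' i hw' hh' hbord] at h
    simpa using h
  | step i j hgr hj hbg ha ih =>
    by_cases hbord : borderN w' h' j
    · have h := pvSweep_getD mask r w' h' j hj
      rw [hfix, hbg, pvOpen_border r w' h' j hw' hh' hbord] at h
      simpa using h
    · have hop : fhOpen r ↑j ↑w' ↑h' = true :=
        (pvOpen_interior r w' h' j hw' hh' hj hbord hr).mpr
          ⟨i, GR_lt hgr, adjN_symm ha, ih⟩
      have h := pvSweep_getD mask r w' h' j hj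
      rw [hfix, hbg, hop] at h
      simpa using h

theorem pvReach_char (mask : List Bool) (w' h' : Nat) (hw' : 0 < w') (hh' : 0 < h') :
    (fhIter mask ↑w' ↑h' (↑w' * ↑h') ((↑w' * ↑h' : Int).toNat + 1)
        (List.replicate ((↑w' * ↑h' : Int)).toNat false)).length = w' * h' ∧
    ∀ k, k < w' * h' →
      ((fhIter mask ↑w' ↑h' (↑w' * ↑h') ((↑w' * ↑h' : Int).toNat + 1)
          (List.replicate ((↑w' * ↑h' : Int)).toNat false)).getD k false = true
        ↔ GR mask w' h' k) := by
  have hWn : ((↑w' * ↑h' : Int)).toNat = w' * h' := by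
    have := pvCast_WW w' h'; omega
  rw [hWn]
  have hsound : ∀ s, s.length = w' * h' →
      (∀ k, k < w' * h' → s.getD k false = true → GR mask w' h' k) →
      ∀ k, k < w' * h' → (fhSweep mask s ↑w' ↑h' (↑w' * ↑h')).getD k false = true →
        GR mask w' h' k := by
    intro s hs hP k hk hnew
    rw [pvSweep_getD mask s w' h' k hk] at hnew
    rcases Bool.or_eq_true_iff.mp hnew with h | h
    · exact hP k hk h
    · obtain ⟨hm, hop⟩ := Bool.and_eq_true_iff.mp h
      have hmk : mask.getD k false = false := by
        cases hmask : mask.getD k false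
        · rfl
        · rw [hmask] at hm; exact absurd hm (by simp)
      by_cases hbord : borderN w' h' k
      · exact GR.border k hk hmk hbord
      · obtain ⟨j, hj, hadj, hsj⟩ := (pvOpen_interior s w' h' k hw' hh' hk hbord hs).mp hop
        exact GR.step j k (hP j hj hsj) hk hmk (adjN_symm hadj)
  obtain ⟨h1, h2, _, h4⟩ := pvIter_props mask w' h'
    (fun s => ∀ k, k < w' * h' → s.getD k false = true → GR mask w' h' k)
    hsound (w' * h' + 1) (List.replicate (w' * h') false)
    (by simp) (by intro k _ hk; simp at hk) (by simp)
  refine ⟨h1, fun k hk => ⟨fun h => h2 k hk h, fun h => ?_⟩⟩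
  exact pvFix_complete mask _ w' h' hw' hh' h1 h4 k h

-- ===== A-side: BFS computes exactly the GR set =====

-- the loop body of fhExpand, named for the proofs (definitionally equal)
def fhExpandStep (mask : List Bool) (width : Int) (st : List Bool × List Int)
    (p : Int × Int) : List Bool × List Int :=
  let next := p.2 * width + p.1
  if !PySem.List.pyGetD st.1 next false && !PySem.List.pyGetD mask next false then
    (st.1.set next.toNat true, st.2 ++ [next])
  else st

theorem pvFold_nbrs (mask : List Bool) (w' h' : Nat) (k0 : Nat)
    (nbrs : List (Int × Int)) :
    (∀ p ∈ nbrs, ∃ m : Nat, p.2 * (↑w' : Int) + p.1 = (m : Int) ∧ m < w' * h' ∧ adjN w' k0 m) →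
    ∀ (v : List Bool) (rest : List Int), v.length = w' * h' →
    (nbrs.foldl (fhExpandStep mask ↑w') (v, rest)).1.length = w' * h' ∧
    (∀ k, v.getD k false = true →
      (nbrs.foldl (fhExpandStep mask ↑w') (v, rest)).1.getD k false = true) ∧
    (∀ k, (nbrs.foldl (fhExpandStep mask ↑w') (v, rest)).1.getD k false = true →
      v.getD k false = true ∨
      (k < w' * h' ∧ adjN w' k0 k ∧ mask.getD k false = false ∧
        ((k : Int) ∈ (nbrs.foldl (fhExpandStep mask ↑w') (v, rest)).2))) ∧
    (∃ ext, (nbrs.foldl (fhExpandStep mask ↑w') (v, rest)).2 = rest ++ ext ∧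
      ∀ e ∈ ext, ∃ m : Nat, e = (m : Int) ∧ m < w' * h' ∧
        (nbrs.foldl (fhExpandStep mask ↑w') (v, rest)).1.getD m false = true) ∧
    (∀ p ∈ nbrs, ∀ m : Nat, p.2 * (↑w' : Int) + p.1 = (m : Int) →
      mask.getD m false = false →
      (nbrs.foldl (fhExpandStep mask ↑w') (v, rest)).1.getD m false = true) ∧
    2 * (nbrs.foldl (fhExpandStep mask ↑w') (v, rest)).1.count false
      + (nbrs.foldl (fhExpandStep mask ↑w') (v, rest)).2.length
      ≤ 2 * v.count false + rest.length := by
  induction nbrs with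
  | nil =>
    intro _ v rest hv
    refine ⟨hv, fun k hk => hk, fun k hk => Or.inl hk, ⟨[], by simp⟩, ?_, by simp⟩
    intro p hp; simp at hp
  | cons p t ih =>
    intro hnb v rest hv
    obtain ⟨m, hpm, hmlt, hmadj⟩ := hnb p (List.mem_cons_self)
    have hnb' := fun p hp => hnb p (List.mem_cons_of_mem _ hp)
    have hcast : ∀ m' : Nat, p.2 * (↑w' : Int) + p.1 = (m' : Int) → m' = m := by
      intro m' h; have := h.symm.trans hpm; exact_mod_cast this
    rw [List.foldl_cons]
    by_cases hvm : v.getD m false = true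
    · have hstep : fhExpandStep mask ↑w' (v, rest) p = (v, rest) := by
        unfold fhExpandStep
        rw [hpm]
        simp only [PySem.List.pyGetD_natCast, Int.toNat_natCast]
        rw [hvm]
        simp
      rw [hstep]
      obtain ⟨h1, h2, h3, h4, h5, h6⟩ := ih hnb' v rest hv
      refine ⟨h1, h2, h3, h4, ?_, h6⟩
      intro p' hp' m' hpm' hmask'
      rcases List.mem_cons.mp hp' with rfl | hp'
      · obtain rfl := hcast m' hpm'
        exact h2 m' hvm
      · exact h5 p' hp' m' hpm' hmask'
    · by_cases hmm : mask.getD m false = true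
      · have hstep : fhExpandStep mask ↑w' (v, rest) p = (v, rest) := by
          unfold fhExpandStep
          rw [hpm]
          simp only [PySem.List.pyGetD_natCast, Int.toNat_natCast]
          rw [hmm]
          simp
        rw [hstep]
        obtain ⟨h1, h2, h3, h4, h5, h6⟩ := ih hnb' v rest hv
        refine ⟨h1, h2, h3, h4, ?_, h6⟩
        intro p' hp' m' hpm' hmask'
        rcases List.mem_cons.mp hp' with rfl | hp'
        · obtain rfl := hcast m' hpm'
          rw [hmask'] at hmm; exact absurd hmm (by simp)
        · exact h5 p' hp' m' hpm' hmask'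
      · have hvm' : v.getD m false = false := by
          cases h : v.getD m false
          · rfl
          · exact absurd h hvm
        have hmm' : mask.getD m false = false := by
          cases h : mask.getD m false
          · rfl
          · exact absurd h hmm
        have hstep : fhExpandStep mask ↑w' (v, rest) p
            = (v.set m true, rest ++ [(m : Int)]) := by
          unfold fhExpandStep
          rw [hpm]
          simp only [PySem.List.pyGetD_natCast, Int.toNat_natCast]
          rw [hvm', hmm']
          simp
        rw [hstep]
        have hmlen : m < v.length := by omega
        have hv1 : (v.set m true).length = w' * h' := by
          rw [List.length_set]; exact hv
        obtain ⟨h1, h2, h3, h4, h5, h6⟩ := ih hnb' (v.set m true) (rest ++ [(m : Int)]) hv1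
        have hmono1 : ∀ k, v.getD k false = true → (v.set m true).getD k false = true :=
          fun k hk => pvGetD_set_true v m k hk
        have hself : (v.set m true).getD m false = true := pvGetD_set_self v m true hmlen
        obtain ⟨ext, hext, hextmem⟩ := h4
        refine ⟨h1, fun k hk => h2 k (hmono1 k hk), ?_, ?_, ?_, ?_⟩
        · intro k hk
          rcases h3 k hk with hk' | hk'
          · by_cases hkm : k = m
            · subst hkm
              refine Or.inr ⟨hmlt, hmadj, hmm', ?_⟩
              rw [hext]
              simp
            · left
              rw [pvGetD_set_ne v m k true (Ne.symm hkm)] at hk'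
              exact hk'
          · exact Or.inr hk'
        · refine ⟨(m : Int) :: ext, by rw [hext, List.append_assoc]; rfl, ?_⟩
          intro e he
          rcases List.mem_cons.mp he with rfl | he
          · exact ⟨m, rfl, hmlt, h2 m hself⟩
          · exact hextmem e he
        · intro p' hp' m' hpm' hmask'
          rcases List.mem_cons.mp hp' with rfl | hp'
          · obtain rfl := hcast m' hpm'
            exact h2 m' hself
          · exact h5 p' hp' m' hpm' hmask'
        · have hcnt := pvCount_false_set v m hmlen hvm'
          have hql : (rest ++ [(m : Int)]).length = rest.length + 1 := by simp
          rw [hql] at h6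
          omega

theorem pvGrid_facts (w' h' k0 : Nat) (hw' : 0 < w') (hk0 : k0 < w' * h') :
    w' * (k0 / w') + k0 % w' = k0 ∧ k0 % w' < w' ∧ k0 / w' < h' := by
  refine ⟨Nat.div_add_mod k0 w', Nat.mod_lt _ hw', ?_⟩
  rw [Nat.div_lt_iff_lt_mul hw']
  exact (Nat.mul_comm w' h') ▸ hk0

theorem pvMem_ite_singleton {α : Type} (p a : α) (c : Prop) [Decidable c] :
    p ∈ (if c then [a] else []) ↔ c ∧ p = a := by
  by_cases h : c <;> simp [h]

theorem pvNbrs_sound (w' h' k0 : Nat) (hw' : 0 < w')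
    (hk0 : k0 < w' * h') :
    ∀ p ∈ neighbors4 ((k0 % w' : Nat) : Int) ((k0 / w' : Nat) : Int) ↑w' ↑h',
      ∃ m : Nat, p.2 * (↑w' : Int) + p.1 = (m : Int) ∧ m < w' * h' ∧ adjN w' k0 m := by
  obtain ⟨hdm, hxlt, hylt⟩ := pvGrid_facts w' h' k0 hw' hk0
  obtain ⟨x, hxeq⟩ : ∃ x, k0 % w' = x := ⟨_, rfl⟩
  obtain ⟨q, hqeq⟩ : ∃ q, k0 / w' = q := ⟨_, rfl⟩
  rw [hxeq] at hdm hxlt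
  rw [hqeq] at hdm hylt
  have hci : (k0 : Int) = (w' : Int) * q + x := by exact_mod_cast hdm.symm
  have hq1 : w' * (q + 1) = w' * q + w' := by ring
  have hqh : q + 1 ≤ h' := hylt
  have hqmul : w' * (q + 1) ≤ w' * h' := Nat.mul_le_mul (Nat.le_refl w') hqh
  intro p hp
  rw [hxeq, hqeq] at hp
  simp only [neighbors4, List.mem_append, pvMem_ite_singleton] at hp
  rcases hp with ((hp | hp) | hp) | hp
  · rcases hp with ⟨hcond, rfl⟩
    have hx1 : 1 ≤ x := by exact_mod_cast hcond
    refine ⟨k0 - 1, ?_, by omega, Or.inr (Or.inl ⟨by omega, ?_⟩)⟩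
    · simp only
      have : ((k0 - 1 : Nat) : Int) = (k0 : Int) - 1 := by omega
      rw [this, hci]; ring
    · have hs : k0 - 1 + 1 = k0 := by omega
      rw [hs, hxeq]; omega
  · rcases hp with ⟨hcond, rfl⟩
    have hx1 : x + 1 < w' := by exact_mod_cast hcond
    have hmod1 : (k0 + 1) % w' = x + 1 := by
      have h1 : k0 + 1 = w' * q + (x + 1) := by omega
      rw [h1, Nat.mul_add_mod]
      exact Nat.mod_eq_of_lt (by omega)
    refine ⟨k0 + 1, ?_, by omega, Or.inl ⟨rfl, by rw [hmod1]; omega⟩⟩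
    simp only
    push_cast
    rw [hci]; ring
  · rcases hp with ⟨hcond, rfl⟩
    have hq0 : 1 ≤ q := by exact_mod_cast hcond
    have hwk : w' ≤ k0 := by
      have : w' * 1 ≤ w' * q := Nat.mul_le_mul (Nat.le_refl w') hq0
      omega
    refine ⟨k0 - w', ?_, by omega, Or.inr (Or.inr (Or.inr (by omega)))⟩
    simp only
    have : ((k0 - w' : Nat) : Int) = (k0 : Int) - w' := by omega
    rw [this, hci]; ring
  · rcases hp with ⟨hcond, rfl⟩
    have hqh' : q + 1 < h' := by exact_mod_cast hcond
    have hqmul' : w' * (q + 1 + 1) ≤ w' * h' := Nat.mul_le_mul (Nat.le_refl w') hqh'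
    have : w' * (q + 1 + 1) = w' * q + w' + w' := by ring
    refine ⟨k0 + w', ?_, by omega, Or.inr (Or.inr (Or.inl rfl))⟩
    simp only
    push_cast
    rw [hci]; ring

theorem pvNbrs_complete (w' h' k0 j : Nat) (hw' : 0 < w')
    (hk0 : k0 < w' * h') (hj : j < w' * h') (hadj : adjN w' k0 j) :
    ∃ p ∈ neighbors4 ((k0 % w' : Nat) : Int) ((k0 / w' : Nat) : Int) ↑w' ↑h',
      p.2 * (↑w' : Int) + p.1 = (j : Int) := by
  obtain ⟨hdm, hxlt, hylt⟩ := pvGrid_facts w' h' k0 hw' hk0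
  obtain ⟨x, hxeq⟩ : ∃ x, k0 % w' = x := ⟨_, rfl⟩
  obtain ⟨q, hqeq⟩ : ∃ q, k0 / w' = q := ⟨_, rfl⟩
  rw [hxeq] at hdm hxlt
  rw [hqeq] at hdm hylt
  have hci : (k0 : Int) = (w' : Int) * q + x := by exact_mod_cast hdm.symm
  rw [hxeq, hqeq]
  simp only [neighbors4, List.mem_append, pvMem_ite_singleton]
  rcases hadj with ⟨rfl, hne⟩ | ⟨hkj, hne⟩ | rfl | hkj
  · -- j = k0 + 1, (k0+1) % w' ≠ 0 : right neighbour, need x + 1 < w'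
    have hxw : x + 1 < w' := by
      by_contra hcon
      have hx1 : x + 1 = w' := by omega
      have : (k0 + 1) % w' = 0 := by
        have h1 : k0 + 1 = w' * (q + 1) := by
          have : w' * (q + 1) = w' * q + w' := by ring
          omega
        rw [h1]
        exact Nat.mul_mod_right w' (q + 1)
      exact hne this
    refine ⟨((x : Int) + 1, (q : Int)), Or.inl (Or.inl (Or.inr ⟨by exact_mod_cast hxw, rfl⟩)), ?_⟩
    simp only
    push_cast
    rw [hci]; ring
  · -- k0 = j + 1, k0 % w' ≠ 0 : left neighbour, need x ≥ 1
    have hx1 : 1 ≤ x := by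
      have hx : (j + 1) % w' = x := by rw [← hkj, hxeq]
      omega
    refine ⟨((x : Int) - 1, (q : Int)),
      Or.inl (Or.inl (Or.inl ⟨by exact_mod_cast hx1, rfl⟩)), ?_⟩
    simp only
    have hjc : (j : Int) = (k0 : Int) - 1 := by omega
    rw [hjc, hci]; ring
  · -- j = k0 + w' : down neighbour, need q + 1 < h'
    have hqh : q + 1 < h' := by
      by_contra hcon
      have hq1 : q + 1 = h' := by omega
      have : w' * (q + 1) = w' * h' := by rw [hq1]
      have hmul : w' * (q + 1) = w' * q + w' := by ring
      omega
    refine ⟨((x : Int), (q : Int) + 1), Or.inr ⟨by exact_mod_cast hqh, rfl⟩, ?_⟩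
    simp only
    push_cast
    rw [hci]; ring
  · -- k0 = j + w' : up neighbour, need q ≥ 1
    have hq1 : 1 ≤ q := by
      by_contra hcon
      have hq0 : q = 0 := by omega
      rw [hq0] at hdm
      omega
    refine ⟨((x : Int), (q : Int) - 1), Or.inl (Or.inr ⟨by exact_mod_cast hq1, rfl⟩), ?_⟩
    simp only
    have hjc : (j : Int) = (k0 : Int) - w' := by omega
    rw [hjc, hci]; ring

theorem pvExpand_props (mask : List Bool) (w' h' : Nat) (hw' : 0 < w')
    (k0 : Nat) (hk0 : k0 < w' * h') (v : List Bool) (rest : List Int)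
    (hv : v.length = w' * h') :
    (fhExpand mask ↑w' ↑h' ↑k0 (v, rest)).1.length = w' * h' ∧
    (∀ k, v.getD k false = true →
      (fhExpand mask ↑w' ↑h' ↑k0 (v, rest)).1.getD k false = true) ∧
    (∀ k, (fhExpand mask ↑w' ↑h' ↑k0 (v, rest)).1.getD k false = true →
      v.getD k false = true ∨
      (k < w' * h' ∧ adjN w' k0 k ∧ mask.getD k false = false ∧
        ((k : Int) ∈ (fhExpand mask ↑w' ↑h' ↑k0 (v, rest)).2))) ∧
    (∃ ext, (fhExpand mask ↑w' ↑h' ↑k0 (v, rest)).2 = rest ++ ext ∧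
      ∀ e ∈ ext, ∃ m : Nat, e = (m : Int) ∧ m < w' * h' ∧
        (fhExpand mask ↑w' ↑h' ↑k0 (v, rest)).1.getD m false = true) ∧
    (∀ j, j < w' * h' → adjN w' k0 j → mask.getD j false = false →
      (fhExpand mask ↑w' ↑h' ↑k0 (v, rest)).1.getD j false = true) ∧
    2 * (fhExpand mask ↑w' ↑h' ↑k0 (v, rest)).1.count false
      + (fhExpand mask ↑w' ↑h' ↑k0 (v, rest)).2.length
      ≤ 2 * v.count false + rest.length := by
  have hrw : fhExpand mask ↑w' ↑h' ↑k0 (v, rest)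
      = (neighbors4 ((k0 % w' : Nat) : Int) ((k0 / w' : Nat) : Int) ↑w' ↑h').foldl
          (fhExpandStep mask ↑w') (v, rest) := by
    unfold fhExpand
    rw [PySem.Int.mod_natCast, PySem.Int.floordiv_natCast]
    rfl
  rw [hrw]
  obtain ⟨h1, h2, h3, h4, h5, h6⟩ := pvFold_nbrs mask w' h' k0
    (neighbors4 ((k0 % w' : Nat) : Int) ((k0 / w' : Nat) : Int) ↑w' ↑h')
    (pvNbrs_sound w' h' k0 hw' hk0) v rest hv
  refine ⟨h1, h2, h3, h4, ?_, h6⟩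
  intro j hjlt hadj hbg
  obtain ⟨p, hpmem, hpeq⟩ := pvNbrs_complete w' h' k0 j hw' hk0 hjlt hadj
  exact h5 p hpmem j hpeq hbg

def InvA (mask : List Bool) (w' h' : Nat) (v : List Bool) (q : List Int) : Prop :=
  v.length = w' * h' ∧
  (∀ i ∈ q, ∃ k : Nat, i = (k : Int) ∧ k < w' * h' ∧ v.getD k false = true) ∧
  (∀ k, k < w' * h' → v.getD k false = true →
    mask.getD k false = false ∧ GR mask w' h' k) ∧
  (∀ k, k < w' * h' → v.getD k false = true → (k : Int) ∉ q →
    ∀ j, j < w' * h' → adjN w' k j → mask.getD j false = false → v.getD j false = true)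

theorem pvBFS_run (mask : List Bool) (w' h' : Nat) (hw' : 0 < w') :
    ∀ (fuel : Nat) (v : List Bool) (q : List Int), InvA mask w' h' v q →
    2 * v.count false + q.length ≤ fuel →
    (fhBFS mask ↑w' ↑h' fuel (v, q)).length = w' * h' ∧
    (∀ k, v.getD k false = true → (fhBFS mask ↑w' ↑h' fuel (v, q)).getD k false = true) ∧
    (∀ k, k < w' * h' → (fhBFS mask ↑w' ↑h' fuel (v, q)).getD k false = true →
      mask.getD k false = false ∧ GR mask w' h' k) ∧
    (∀ k, k < w' * h' → (fhBFS mask ↑w' ↑h' fuel (v, q)).getD k false = true →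
      ∀ j, j < w' * h' → adjN w' k j → mask.getD j false = false →
      (fhBFS mask ↑w' ↑h' fuel (v, q)).getD j false = true) := by
  intro fuel
  induction fuel with
  | zero =>
    intro v q hInv hfuel
    cases q with
    | nil =>
      have hred : fhBFS mask ↑w' ↑h' 0 (v, []) = v := rfl
      rw [hred]
      exact ⟨hInv.1, fun k hk => hk, fun k hk hv => hInv.2.2.1 k hk hv,
        fun k hk hv j hj ha hb =>
          hInv.2.2.2 k hk hv (List.not_mem_nil) j hj ha hb⟩
    | cons i rest => simp at hfuel
  | succ fuel ih =>
    intro v q hInv hfuel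
    cases q with
    | nil =>
      have hred : fhBFS mask ↑w' ↑h' (fuel + 1) (v, []) = v := rfl
      rw [hred]
      exact ⟨hInv.1, fun k hk => hk, fun k hk hv => hInv.2.2.1 k hk hv,
        fun k hk hv j hj ha hb =>
          hInv.2.2.2 k hk hv (List.not_mem_nil) j hj ha hb⟩
    | cons i rest =>
      have hred : fhBFS mask ↑w' ↑h' (fuel + 1) (v, i :: rest)
          = fhBFS mask ↑w' ↑h' fuel (fhExpand mask ↑w' ↑h' i (v, rest)) := rfl
      rw [hred]
      obtain ⟨k0, rfl, hk0, hvk0⟩ := hInv.2.1 i (List.mem_cons_self)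
      obtain ⟨e1, e2, e3, ⟨ext, hext, hextmem⟩, e5, e6⟩ :=
        pvExpand_props mask w' h' hw' k0 hk0 v rest hInv.1
      have hpair : fhExpand mask ↑w' ↑h' ↑k0 (v, rest)
          = ((fhExpand mask ↑w' ↑h' ↑k0 (v, rest)).1,
             (fhExpand mask ↑w' ↑h' ↑k0 (v, rest)).2) := rfl
      have hInv' : InvA mask w' h' (fhExpand mask ↑w' ↑h' ↑k0 (v, rest)).1
          (fhExpand mask ↑w' ↑h' ↑k0 (v, rest)).2 := by
        refine ⟨e1, ?_, ?_, ?_⟩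
        · intro i' hi'
          rw [hext] at hi'
          rcases List.mem_append.mp hi' with hi' | hi'
          · obtain ⟨k, rfl, hklt, hkv⟩ := hInv.2.1 i' (List.mem_cons_of_mem _ hi')
            exact ⟨k, rfl, hklt, e2 k hkv⟩
          · obtain ⟨m, rfl, hmlt, hmv⟩ := hextmem i' hi'
            exact ⟨m, rfl, hmlt, hmv⟩
        · intro k hk hkv
          rcases e3 k hkv with hkv' | ⟨_, hadj, hbg, _⟩
          · exact hInv.2.2.1 k hk hkv'
          · exact ⟨hbg, GR.step k0 k (hInv.2.2.1 k0 hk0 hvk0).2 hk hbg hadj⟩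
        · intro k hk hkv hknq j hj ha hb
          rcases e3 k hkv with hkv' | ⟨_, _, _, hkq⟩
          · by_cases hkk0 : k = k0
            · subst hkk0
              exact e5 j hj ha hb
            · have hnotin : ((k : Int)) ∉ (↑k0 : Int) :: rest := by
                intro hmem
                rcases List.mem_cons.mp hmem with heq | hmem
                · exact hkk0 (by exact_mod_cast heq)
                · exact hknq (by rw [hext]; exact List.mem_append_left _ hmem)
              exact e2 j (hInv.2.2.2 k hk hkv' hnotin j hj ha hb)
          · exact absurd hkq hknq
      have hmeas : 2 * (fhExpand mask ↑w' ↑h' ↑k0 (v, rest)).1.count false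
          + (fhExpand mask ↑w' ↑h' ↑k0 (v, rest)).2.length ≤ fuel := by
        have : (↑k0 :: rest : List Int).length = rest.length + 1 := by simp
        omega
      obtain ⟨r1, r2, r3, r4⟩ := ih (fhExpand mask ↑w' ↑h' ↑k0 (v, rest)).1
        (fhExpand mask ↑w' ↑h' ↑k0 (v, rest)).2 hInv' hmeas
      rw [← hpair] at r1 r2 r3 r4
      exact ⟨r1, fun k hk => r2 k (e2 k hk), r3, r4⟩

def SInv (mask : List Bool) (w' h' : Nat) (v : List Bool) (q : List Int) : Prop :=
  v.length = w' * h' ∧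
  (∀ k : Nat, v.getD k false = true → (k : Int) ∈ q) ∧
  (∀ i ∈ q, ∃ k : Nat, i = (k : Int) ∧ k < w' * h' ∧ v.getD k false = true ∧
    mask.getD k false = false ∧ borderN w' h' k)

theorem pvEnq_len (mask : List Bool) (v : List Bool) (q : List Int) (idx : Int) :
    (fhEnqueue mask (v, q) idx).1.length = v.length := by
  unfold fhEnqueue
  split
  · rfl
  · exact List.length_set

theorem pvEnq_mono (mask : List Bool) (v : List Bool) (q : List Int) (idx : Int) (j : Nat)
    (h : v.getD j false = true) : (fhEnqueue mask (v, q) idx).1.getD j false = true := by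
  unfold fhEnqueue
  split
  · exact h
  · exact pvGetD_set_true v idx.toNat j h

theorem pvEnq_estab (mask : List Bool) (v : List Bool) (q : List Int) (k : Nat)
    (hk : k < v.length) (hm : mask.getD k false = false) :
    (fhEnqueue mask (v, q) (k : Int)).1.getD k false = true := by
  unfold fhEnqueue
  simp only [PySem.List.pyGetD_natCast, Int.toNat_natCast]
  split
  · rename_i hguard
    rw [hm] at hguard
    simpa using hguard
  · exact pvGetD_set_self v k true hk

theorem pvEnq_SInv (mask : List Bool) (w' h' : Nat) (v : List Bool) (q : List Int)
    (hS : SInv mask w' h' v q) (k : Nat) (hk : k < w' * h') (hb : borderN w' h' k) :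
    SInv mask w' h' (fhEnqueue mask (v, q) (k : Int)).1 (fhEnqueue mask (v, q) (k : Int)).2 := by
  unfold fhEnqueue
  simp only [PySem.List.pyGetD_natCast, Int.toNat_natCast]
  split
  · exact hS
  · rename_i hguard
    have hvk : v.getD k false = false := by
      cases h : v.getD k false
      · rfl
      · rw [h] at hguard; simp at hguard
    have hmk : mask.getD k false = false := by
      cases h : mask.getD k false
      · rfl
      · rw [h] at hguard; simp at hguard
    refine ⟨by rw [List.length_set]; exact hS.1, ?_, ?_⟩
    · intro j hj
      by_cases hjk : j = k
      · subst hjk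
        simp
      · rw [pvGetD_set_ne v k j true (Ne.symm hjk)] at hj
        exact List.mem_append_left _ (hS.2.1 j hj)
    · intro i hi
      rcases List.mem_append.mp hi with hi | hi
      · obtain ⟨k', rfl, h1, h2, h3, h4⟩ := hS.2.2 i hi
        exact ⟨k', rfl, h1, pvGetD_set_true v k k' h2, h3, h4⟩
      · rw [List.mem_singleton] at hi
        subst hi
        exact ⟨k, rfl, hk, pvGetD_set_self v k true (by rw [hS.1]; exact hk), hmk, hb⟩

theorem pvMulPred (a b : Nat) (ha : 0 < a) : (a - 1) * b + b = a * b := by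
  rw [← Nat.succ_mul]
  congr 1
  omega

-- every index the seeding loops enqueue is a border cell of the grid
theorem pvSeeds_props (mask : List Bool) (w' h' : Nat) (hw' : 0 < w') (hh' : 0 < h') :
    SInv mask w' h' (fhSeeds mask ↑w' ↑h').1 (fhSeeds mask ↑w' ↑h').2 ∧
    (∀ k, k < w' * h' → borderN w' h' k → mask.getD k false = false →
      (fhSeeds mask ↑w' ↑h').1.getD k false = true) := by
  have hWn : ((↑w' * ↑h' : Int)).toNat = w' * h' := by
    have := pvCast_WW w' h'; omega
  have hseeds : fhSeeds mask ↑w' ↑h'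
      = (PySem.List.pyRange 0 ↑h' 1).foldl
          (fun st y => fhEnqueue mask (fhEnqueue mask st (y * ↑w')) (y * ↑w' + ↑w' - 1))
          ((PySem.List.pyRange 0 ↑w' 1).foldl
            (fun st x => fhEnqueue mask (fhEnqueue mask st x) (((↑h' : Int) - 1) * ↑w' + x))
            (List.replicate ((↑w' * ↑h' : Int)).toNat false, [])) := rfl
  -- element facts for loop 1
  have hel1 : ∀ x ∈ PySem.List.pyRange 0 (↑w' : Int) 1, ∃ t : Nat, x = (t : Int) ∧ t < w' := by
    intro x hx
    obtain ⟨h0, h1⟩ := PySem.List.mem_pyRange_one.mp hx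
    exact ⟨x.toNat, by omega, by omega⟩
  have hel2 : ∀ y ∈ PySem.List.pyRange 0 (↑h' : Int) 1, ∃ u : Nat, y = (u : Int) ∧ u < h' := by
    intro y hy
    obtain ⟨h0, h1⟩ := PySem.List.mem_pyRange_one.mp hy
    exact ⟨y.toNat, by omega, by omega⟩
  -- index normalizations
  have hidx1 : ∀ t : Nat, t < w' →
      ((↑h' : Int) - 1) * ↑w' + ↑t = (((h' - 1) * w' + t : Nat) : Int) := by
    intro t ht
    have e : ((h' - 1 : Nat) : Int) = (h' : Int) - 1 := by omega
    push_cast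
    rw [e]
  have hidx2 : ∀ u : Nat, (↑u : Int) * ↑w' = ((u * w' : Nat) : Int) := by
    intro u; push_cast; ring
  have hidx3 : ∀ u : Nat, (↑u : Int) * ↑w' + ↑w' - 1 = ((u * w' + (w' - 1) : Nat) : Int) := by
    intro u
    have e : ((w' - 1 : Nat) : Int) = (w' : Int) - 1 := by omega
    push_cast
    rw [e]
    ring
  -- bounds and border facts
  have hb1 : ∀ t : Nat, t < w' → t < w' * h' ∧ borderN w' h' t := by
    intro t ht
    constructor
    · calc t < w' := ht
        _ ≤ w' * h' := Nat.le_mul_of_pos_right w' hh'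
    · exact Or.inr (Or.inr (Or.inl (Nat.div_eq_of_lt ht)))
  have hb2 : ∀ t : Nat, t < w' → (h' - 1) * w' + t < w' * h' ∧ borderN w' h' ((h' - 1) * w' + t) := by
    intro t ht
    have hm := pvMulPred h' w' hh'
    have hlt : (h' - 1) * w' + t < w' * h' := by
      have : w' * h' = h' * w' := Nat.mul_comm w' h'
      omega
    refine ⟨hlt, Or.inr (Or.inr (Or.inr ?_))⟩
    have hcomm : (h' - 1) * w' + t = t + w' * (h' - 1) := by ring
    rw [hcomm, Nat.add_mul_div_left _ _ hw', Nat.div_eq_of_lt ht]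
    omega
  have hb3 : ∀ u : Nat, u < h' → u * w' < w' * h' ∧ borderN w' h' (u * w') := by
    intro u hu
    have hle : (u + 1) * w' ≤ h' * w' := Nat.mul_le_mul (by omega) (Nat.le_refl w')
    have he : (u + 1) * w' = u * w' + w' := by ring
    refine ⟨by rw [Nat.mul_comm w' h']; omega, Or.inl (Nat.mul_mod_left u w')⟩
  have hb4 : ∀ u : Nat, u < h' → u * w' + (w' - 1) < w' * h' ∧ borderN w' h' (u * w' + (w' - 1)) := by
    intro u hu
    have hle : (u + 1) * w' ≤ h' * w' := Nat.mul_le_mul (by omega) (Nat.le_refl w')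
    have he : (u + 1) * w' = u * w' + w' := by ring
    refine ⟨by rw [Nat.mul_comm w' h']; omega, Or.inr (Or.inl ?_)⟩
    have hcomm : u * w' + (w' - 1) = w' * u + (w' - 1) := by ring
    rw [hcomm, Nat.mul_add_mod]
    exact Nat.mod_eq_of_lt (by omega)
  -- SInv is preserved by both loops
  have hS0 : SInv mask w' h' (List.replicate ((↑w' * ↑h' : Int)).toNat false) [] := by
    rw [hWn]
    refine ⟨by simp, ?_, ?_⟩
    · intro k hk
      simp at hk
    · intro i hi; simp at hi
  have hpres1 : ∀ (st : List Bool × List Int) (x : Int),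
      x ∈ PySem.List.pyRange 0 (↑w' : Int) 1 → SInv mask w' h' st.1 st.2 →
      SInv mask w' h' (fhEnqueue mask (fhEnqueue mask st x) (((↑h' : Int) - 1) * ↑w' + x)).1
        (fhEnqueue mask (fhEnqueue mask st x) (((↑h' : Int) - 1) * ↑w' + x)).2 := by
    intro st x hx hS
    obtain ⟨t, rfl, ht⟩ := hel1 x hx
    obtain ⟨hlt1, hbord1⟩ := hb1 t ht
    obtain ⟨hlt2, hbord2⟩ := hb2 t ht
    rw [hidx1 t ht]
    have h1 := pvEnq_SInv mask w' h' st.1 st.2 hS t hlt1 hbord1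
    exact pvEnq_SInv mask w' h' _ _ h1 _ hlt2 hbord2
  have hpres2 : ∀ (st : List Bool × List Int) (y : Int),
      y ∈ PySem.List.pyRange 0 (↑h' : Int) 1 → SInv mask w' h' st.1 st.2 →
      SInv mask w' h' (fhEnqueue mask (fhEnqueue mask st (y * ↑w')) (y * ↑w' + ↑w' - 1)).1
        (fhEnqueue mask (fhEnqueue mask st (y * ↑w')) (y * ↑w' + ↑w' - 1)).2 := by
    intro st y hy hS
    obtain ⟨u, rfl, hu⟩ := hel2 y hy
    obtain ⟨hlt1, hbord1⟩ := hb3 u hu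
    obtain ⟨hlt2, hbord2⟩ := hb4 u hu
    rw [hidx3 u, hidx2 u]
    have h1 := pvEnq_SInv mask w' h' st.1 st.2 hS _ hlt1 hbord1
    exact pvEnq_SInv mask w' h' _ _ h1 _ hlt2 hbord2
  have hSfin : SInv mask w' h' (fhSeeds mask ↑w' ↑h').1 (fhSeeds mask ↑w' ↑h').2 := by
    rw [hseeds]
    apply pvFoldl_pres _ (fun st : List Bool × List Int => SInv mask w' h' st.1 st.2) _ _
      (fun s a ha hs => hpres2 s a ha hs)
    apply pvFoldl_pres _ (fun st : List Bool × List Int => SInv mask w' h' st.1 st.2) _ _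
      (fun s a ha hs => hpres1 s a ha hs)
    exact hS0
  refine ⟨hSfin, ?_⟩
  -- establishment: every border background cell is visited after seeding
  intro k hk hbord hbg
  have hIpres : ∀ (st : List Bool × List Int) (a : Int),
      st.1.length = w' * h' →
      (fhEnqueue mask st a).1.length = w' * h' := by
    intro st a h
    rw [← h]
    exact pvEnq_len mask st.1 st.2 a
  have hPmono : ∀ (st : List Bool × List Int) (a : Int),
      st.1.getD k false = true → (fhEnqueue mask st a).1.getD k false = true := by
    intro st a h
    exact pvEnq_mono mask st.1 st.2 a k h
  have hklen : k < w' * h' := hk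
  rw [hseeds]
  have hI0 : (List.replicate ((↑w' * ↑h' : Int)).toNat false, ([] : List Int)).1.length
      = w' * h' := by simp [hWn]
  -- the fold over loop 1 preserves length
  have hIfold1 : ∀ (st : List Bool × List Int), st.1.length = w' * h' →
      ((PySem.List.pyRange 0 (↑w' : Int) 1).foldl
        (fun st x => fhEnqueue mask (fhEnqueue mask st x) (((↑h' : Int) - 1) * ↑w' + x)) st).1.length
      = w' * h' := by
    intro st h
    exact pvFoldl_pres _ (fun st : List Bool × List Int => st.1.length = w' * h') _ st
      (fun s a _ hs => hIpres _ _ (hIpres _ _ hs)) h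
  rcases hbord with hc | hc | hc | hc
  · -- k % w' = 0 : enqueued by loop 2 at y = k / w'
    have hy : ((k / w' : Nat) : Int) ∈ PySem.List.pyRange 0 (↑h' : Int) 1 := by
      rw [PySem.List.mem_pyRange_one]
      have := (pvGrid_facts w' h' k hw' hk).2.2
      exact ⟨Int.natCast_nonneg _, by exact_mod_cast this⟩
    have hkeq : (k / w') * w' = k := by
      have := Nat.div_add_mod k w'
      have hcm : (k / w') * w' = w' * (k / w') := Nat.mul_comm _ _
      omega
    refine pvFoldl_estab _ (fun st : List Bool × List Int => st.1.length = w' * h')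
      (fun st : List Bool × List Int => st.1.getD k false = true) _ _
      (fun s a hs => hIpres _ _ (hIpres _ _ hs))
      (fun s a hs => hPmono _ _ (hPmono _ _ hs))
      (hIfold1 _ hI0) _ hy ?_
    intro s hs
    apply hPmono
    rw [hidx2 (k / w'), hkeq]
    exact pvEnq_estab mask s.1 s.2 k (by omega) hbg
  · -- k % w' = w' - 1 : enqueued by loop 2 at y = k / w'
    have hy : ((k / w' : Nat) : Int) ∈ PySem.List.pyRange 0 (↑h' : Int) 1 := by
      rw [PySem.List.mem_pyRange_one]
      have := (pvGrid_facts w' h' k hw' hk).2.2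
      exact ⟨Int.natCast_nonneg _, by exact_mod_cast this⟩
    have hkeq : (k / w') * w' + (w' - 1) = k := by
      have := Nat.div_add_mod k w'
      have hcm : (k / w') * w' = w' * (k / w') := Nat.mul_comm _ _
      omega
    refine pvFoldl_estab _ (fun st : List Bool × List Int => st.1.length = w' * h')
      (fun st : List Bool × List Int => st.1.getD k false = true) _ _
      (fun s a hs => hIpres _ _ (hIpres _ _ hs))
      (fun s a hs => hPmono _ _ (hPmono _ _ hs))
      (hIfold1 _ hI0) _ hy ?_
    intro s hs
    rw [hidx3 (k / w'), hkeq]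
    have hlen1 : (fhEnqueue mask s (↑(k / w') * (↑w' : Int))).1.length = w' * h' :=
      hIpres s _ hs
    exact pvEnq_estab mask _ _ k (Nat.lt_of_lt_of_eq hk hlen1.symm) hbg
  · -- k / w' = 0 : enqueued by loop 1 at x = k
    have hkw : k < w' := by
      have hfacts := pvGrid_facts w' h' k hw' hk
      have := hfacts.1
      rw [hc] at this
      omega
    have hx : ((k : Nat) : Int) ∈ PySem.List.pyRange 0 (↑w' : Int) 1 := by
      rw [PySem.List.mem_pyRange_one]
      exact ⟨Int.natCast_nonneg _, by exact_mod_cast hkw⟩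
    apply pvFoldl_pres _ (fun st : List Bool × List Int => st.1.getD k false = true) _ _
      (fun s a _ hs => hPmono _ _ (hPmono _ _ hs))
    refine pvFoldl_estab _ (fun st : List Bool × List Int => st.1.length = w' * h')
      (fun st : List Bool × List Int => st.1.getD k false = true) _ _
      (fun s a hs => hIpres _ _ (hIpres _ _ hs))
      (fun s a hs => hPmono _ _ (hPmono _ _ hs))
      hI0 _ hx ?_
    intro s hs
    apply hPmono
    exact pvEnq_estab mask s.1 s.2 k (by omega) hbg
  · -- k / w' = h' - 1 : enqueued by loop 1 at x = k % w'
    have hfacts := pvGrid_facts w' h' k hw' hk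
    have hx : ((k % w' : Nat) : Int) ∈ PySem.List.pyRange 0 (↑w' : Int) 1 := by
      rw [PySem.List.mem_pyRange_one]
      exact ⟨Int.natCast_nonneg _, by exact_mod_cast hfacts.2.1⟩
    have hkeq : (h' - 1) * w' + k % w' = k := by
      have := hfacts.1
      have hcm : (h' - 1) * w' = w' * (h' - 1) := Nat.mul_comm _ _
      rw [hc] at this
      omega
    apply pvFoldl_pres _ (fun st : List Bool × List Int => st.1.getD k false = true) _ _
      (fun s a _ hs => hPmono _ _ (hPmono _ _ hs))
    refine pvFoldl_estab _ (fun st : List Bool × List Int => st.1.length = w' * h')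
      (fun st : List Bool × List Int => st.1.getD k false = true) _ _
      (fun s a hs => hIpres _ _ (hIpres _ _ hs))
      (fun s a hs => hPmono _ _ (hPmono _ _ hs))
      hI0 _ hx ?_
    intro s hs
    rw [hidx1 (k % w') hfacts.2.1, hkeq]
    have hlen1 : (fhEnqueue mask s ((↑(k % w') : Int))).1.length = w' * h' :=
      hIpres s _ hs
    exact pvEnq_estab mask _ _ k (Nat.lt_of_lt_of_eq hk hlen1.symm) hbg

theorem pvVisited_char (mask : List Bool) (w' h' : Nat) (hw' : 0 < w') (hh' : 0 < h') :
    (fhBFS mask ↑w' ↑h' (2 * ((↑w' * ↑h' : Int)).toNat + (fhSeeds mask ↑w' ↑h').2.length)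
      (fhSeeds mask ↑w' ↑h')).length = w' * h' ∧
    ∀ k, k < w' * h' →
      ((fhBFS mask ↑w' ↑h' (2 * ((↑w' * ↑h' : Int)).toNat + (fhSeeds mask ↑w' ↑h').2.length)
        (fhSeeds mask ↑w' ↑h')).getD k false = true ↔ GR mask w' h' k) := by
  obtain ⟨hS, hestab⟩ := pvSeeds_props mask w' h' hw' hh'
  have hWn : ((↑w' * ↑h' : Int)).toNat = w' * h' := by
    have := pvCast_WW w' h'; omega
  have hInv : InvA mask w' h' (fhSeeds mask ↑w' ↑h').1 (fhSeeds mask ↑w' ↑h').2 := by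
    refine ⟨hS.1, ?_, ?_, ?_⟩
    · intro i hi
      obtain ⟨k, rfl, h1, h2, _, _⟩ := hS.2.2 i hi
      exact ⟨k, rfl, h1, h2⟩
    · intro k hk hv
      obtain ⟨k', hke, h1, h2, h3, h4⟩ := hS.2.2 (k : Int) (hS.2.1 k hv)
      obtain rfl : k = k' := by exact_mod_cast hke
      exact ⟨h3, GR.border k h1 h3 h4⟩
    · intro k hk hv hnq
      exact absurd (hS.2.1 k hv) hnq
  have hfuel : 2 * (fhSeeds mask ↑w' ↑h').1.count false + (fhSeeds mask ↑w' ↑h').2.length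
      ≤ 2 * ((↑w' * ↑h' : Int)).toNat + (fhSeeds mask ↑w' ↑h').2.length := by
    have h1 : (fhSeeds mask ↑w' ↑h').1.count false ≤ (fhSeeds mask ↑w' ↑h').1.length :=
      List.count_le_length
    have h2 := hS.1
    omega
  obtain ⟨r1, r2, r3, r4⟩ := pvBFS_run mask w' h' hw'
    (2 * ((↑w' * ↑h' : Int)).toNat + (fhSeeds mask ↑w' ↑h').2.length)
    (fhSeeds mask ↑w' ↑h').1 (fhSeeds mask ↑w' ↑h').2 hInv hfuel
  refine ⟨r1, fun k hk => ⟨fun h => (r3 k hk h).2, fun h => ?_⟩⟩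
  clear hk
  induction h with
  | border i hi hb hbord => exact r2 i (hestab i hi hbord hb)
  | step i j hgr hj hbg ha ih => exact r4 i (GR_lt hgr) ih j hj ha hbg

theorem pvFold_set {α : Type} (f : α → Nat) (P : α → Bool) :
    ∀ (xs : List α) (acc : List Bool), (∀ a ∈ xs, f a < acc.length) →
    ((xs.foldl (fun filled a => if P a then filled.set (f a) true else filled) acc).length
      = acc.length) ∧
    (∀ k : Nat,
      ((xs.foldl (fun filled a => if P a then filled.set (f a) true else filled) acc).getD k false
        = true ↔
      (acc.getD k false = true ∨ ∃ a ∈ xs, f a = k ∧ P a = true))) := by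
  intro xs
  induction xs with
  | nil =>
    intro acc _
    refine ⟨rfl, fun k => ?_⟩
    simp
  | cons a t ih =>
    intro acc hb
    rw [List.foldl_cons]
    by_cases hPa : P a = true
    · rw [if_pos hPa]
      have hfa : f a < acc.length := hb a List.mem_cons_self
      obtain ⟨l1, l2⟩ := ih (acc.set (f a) true)
        (fun x hx => by rw [List.length_set]; exact hb x (List.mem_cons_of_mem _ hx))
      refine ⟨by rw [l1, List.length_set], fun k => ?_⟩
      rw [l2 k]
      constructor
      · rintro (hk | ⟨x, hx, hfx, hPx⟩)
        · by_cases hk2 : f a = k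
          · exact Or.inr ⟨a, List.mem_cons_self, hk2, hPa⟩
          · rw [pvGetD_set_ne acc (f a) k true hk2] at hk
            exact Or.inl hk
        · exact Or.inr ⟨x, List.mem_cons_of_mem _ hx, hfx, hPx⟩
      · rintro (hk | ⟨x, hx, hfx, hPx⟩)
        · exact Or.inl (pvGetD_set_true acc (f a) k hk)
        · rcases List.mem_cons.mp hx with rfl | hx
          · subst hfx
            exact Or.inl (pvGetD_set_self acc (f x) true hfa)
          · exact Or.inr ⟨x, hx, hfx, hPx⟩
    · rw [if_neg hPa]
      obtain ⟨l1, l2⟩ := ih acc (fun x hx => hb x (List.mem_cons_of_mem _ hx))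
      refine ⟨l1, fun k => ?_⟩
      rw [l2 k]
      constructor
      · rintro (hk | ⟨x, hx, hfx, hPx⟩)
        · exact Or.inl hk
        · exact Or.inr ⟨x, List.mem_cons_of_mem _ hx, hfx, hPx⟩
      · rintro (hk | ⟨x, hx, hfx, hPx⟩)
        · exact Or.inl hk
        · rcases List.mem_cons.mp hx with rfl | hx
          · exact absurd hPx hPa
          · exact Or.inr ⟨x, hx, hfx, hPx⟩

theorem pvFill_eq (mask visited reach : List Bool) (w' h' : Nat)
    (hlen : w' * h' ≤ mask.length)
    (htail : ∀ b ∈ mask.drop (w' * h'), b = true)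
    (hagree : ∀ k, k < w' * h' → visited.getD k false = reach.getD k false) :
    (PySem.List.enumerate mask).foldl
      (fun filled p =>
        if !p.2 && !PySem.List.pyGetD visited p.1 false then filled.set p.1.toNat true
        else filled) mask
    = (PySem.List.pyRange 0 ((↑w' : Int) * ↑h') 1).foldl
      (fun filled i =>
        if !PySem.List.pyGetD mask i false && !PySem.List.pyGetD reach i false then
          filled.set i.toNat true
        else filled) mask := by
  have hbA : ∀ p ∈ PySem.List.enumerate mask 0, (fun p : Int × Bool => p.1.toNat) p < mask.length := by
    intro p hp
    obtain ⟨k', hk', rfl⟩ := (PySem.List.mem_enumerate_iff mask 0 p).mp hp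
    simpa using hk'
  have hbB : ∀ i ∈ PySem.List.pyRange 0 ((↑w' : Int) * ↑h') 1,
      (fun i : Int => i.toNat) i < mask.length := by
    intro i hi
    obtain ⟨h0, h1⟩ := PySem.List.mem_pyRange_one.mp hi
    have hW : ((w' * h' : Nat) : Int) = ↑w' * ↑h' := by push_cast; ring
    have h2 : i.toNat < w' * h' := by omega
    exact (by omega : i.toNat < mask.length)
  obtain ⟨lA, gA⟩ := pvFold_set (fun p : Int × Bool => p.1.toNat)
    (fun p : Int × Bool => !p.2 && !PySem.List.pyGetD visited p.1 false)
    (PySem.List.enumerate mask 0) mask hbA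
  obtain ⟨lB, gB⟩ := pvFold_set (fun i : Int => i.toNat)
    (fun i : Int => !PySem.List.pyGetD mask i false && !PySem.List.pyGetD reach i false)
    (PySem.List.pyRange 0 ((↑w' : Int) * ↑h') 1) mask hbB
  -- existence conditions in closed form
  have eA : ∀ k : Nat,
      (∃ p ∈ PySem.List.enumerate mask 0, (fun p : Int × Bool => p.1.toNat) p = k ∧
        (fun p : Int × Bool => !p.2 && !PySem.List.pyGetD visited p.1 false) p = true) ↔
      (∃ hkl : k < mask.length, mask[k] = false ∧ visited.getD k false = false) := by
    intro k
    constructor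
    · rintro ⟨p, hp, hpk, hPp⟩
      obtain ⟨k', hk', rfl⟩ := (PySem.List.mem_enumerate_iff mask 0 p).mp hp
      simp only at hpk hPp
      have hkk : k = k' := by simpa using hpk.symm
      subst hkk
      simp only [zero_add, PySem.List.pyGetD_natCast, Bool.and_eq_true, Bool.not_eq_true'] at hPp
      exact ⟨hk', hPp.1, hPp.2⟩
    · rintro ⟨hkl, hm, hv⟩
      refine ⟨((k : Int), mask[k]), ?_, by simp, ?_⟩
      · exact (PySem.List.mem_enumerate_iff mask 0 _).mpr ⟨k, hkl, by simp⟩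
      · simp only [PySem.List.pyGetD_natCast, Bool.and_eq_true, Bool.not_eq_true']
        exact ⟨hm, hv⟩
  have eB : ∀ k : Nat,
      (∃ i ∈ PySem.List.pyRange 0 ((↑w' : Int) * ↑h') 1, (fun i : Int => i.toNat) i = k ∧
        (fun i : Int => !PySem.List.pyGetD mask i false && !PySem.List.pyGetD reach i false) i
          = true) ↔
      (k < w' * h' ∧ mask.getD k false = false ∧ reach.getD k false = false) := by
    intro k
    have hW : ((w' * h' : Nat) : Int) = ↑w' * ↑h' := by push_cast; ring
    constructor
    · rintro ⟨i, hi, hik, hPi⟩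
      obtain ⟨h0, h1⟩ := PySem.List.mem_pyRange_one.mp hi
      simp only at hik hPi
      obtain rfl : i = (k : Int) := by omega
      simp only [PySem.List.pyGetD_natCast, Bool.and_eq_true, Bool.not_eq_true'] at hPi
      exact ⟨by omega, hPi.1, hPi.2⟩
    · rintro ⟨hkl, hm, hv⟩
      refine ⟨(k : Int), PySem.List.mem_pyRange_one.mpr ⟨Int.natCast_nonneg _, by omega⟩,
        by simp, ?_⟩
      simp only [PySem.List.pyGetD_natCast, Bool.and_eq_true, Bool.not_eq_true']
      exact ⟨hm, hv⟩
  apply List.ext_getElem (by rw [lA, lB])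
  intro k h1 h2
  rw [← List.getD_eq_getElem _ false h1, ← List.getD_eq_getElem _ false h2]
  have hkm : k < mask.length := by rw [lA] at h1; exact h1
  have hmaskD : mask.getD k false = mask[k] := List.getD_eq_getElem _ _ hkm
  have hcondiff : (mask.getD k false = true ∨
        (∃ p ∈ PySem.List.enumerate mask 0, (fun p : Int × Bool => p.1.toNat) p = k ∧
          (fun p : Int × Bool => !p.2 && !PySem.List.pyGetD visited p.1 false) p = true)) ↔
      (mask.getD k false = true ∨
        (∃ i ∈ PySem.List.pyRange 0 ((↑w' : Int) * ↑h') 1, (fun i : Int => i.toNat) i = k ∧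
          (fun i : Int => !PySem.List.pyGetD mask i false &&
            !PySem.List.pyGetD reach i false) i = true)) := by
    rw [eA k, eB k]
    by_cases hkW : k < w' * h'
    · constructor
      · rintro (h | ⟨_, hm, hv⟩)
        · exact Or.inl h
        · rw [hagree k hkW] at hv
          exact Or.inr ⟨hkW, by rw [hmaskD]; exact hm, hv⟩
      · rintro (h | ⟨_, hm, hv⟩)
        · exact Or.inl h
        · rw [← hagree k hkW] at hv
          exact Or.inr ⟨hkm, by rw [← hmaskD]; exact hm, hv⟩
    · -- beyond the grid the mask is all True
      have hmk : mask[k] = true := by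
        have hdl : k - w' * h' < (mask.drop (w' * h')).length := by
          rw [List.length_drop]; omega
        have hq : (mask.drop (w' * h'))[k - w' * h']? = mask[k]? := by
          rw [List.getElem?_drop]
          congr 1
          omega
        have e1 : mask[k]? = some ((mask.drop (w' * h'))[k - w' * h']) := by
          rw [← hq]
          exact List.getElem?_eq_getElem hdl
        have e2 : mask[k]? = some mask[k] := List.getElem?_eq_getElem hkm
        have e3 : (mask.drop (w' * h'))[k - w' * h'] = mask[k] :=
          Option.some.inj (e1.symm.trans e2)
        rw [← e3]
        exact htail _ (List.getElem_mem hdl)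
      constructor
      · rintro (h | ⟨_, hm, _⟩)
        · exact Or.inl h
        · rw [hmk] at hm; exact absurd hm (by simp)
      · rintro (h | ⟨hkW', _, _⟩)
        · exact Or.inl h
        · exact absurd hkW' hkW
  cases hvA : (List.foldl
      (fun filled p =>
        if (fun p : Int × Bool => !p.2 && !PySem.List.pyGetD visited p.1 false) p = true then
          filled.set ((fun p : Int × Bool => p.1.toNat) p) true
        else filled) mask (PySem.List.enumerate mask 0)).getD k false with
  | true =>
    have := hcondiff.mp ((gA k).mp hvA)
    exact ((gB k).mpr this).symm
  | false =>
    cases hvB : (List.foldl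
        (fun filled i =>
          if (fun i : Int => !PySem.List.pyGetD mask i false &&
              !PySem.List.pyGetD reach i false) i = true then
            filled.set ((fun i : Int => i.toNat) i) true
          else filled) mask (PySem.List.pyRange 0 ((↑w' : Int) * ↑h') 1)).getD k false with
    | true =>
      have := hcondiff.mpr ((gB k).mp hvB)
      rw [(gA k).mpr this] at hvA
      exact absurd hvA (by simp)
    | false => rfl

-- ===== VERDICT (by name: the statement is the Claim_ definition above) =====
theorem fill_holes_spec : Claim_equal_fill_holes := by
  intro mask width height hdom hpre
  unfold Spec_fill_holes
  by_cases hneg : width ≤ 0 ∨ height ≤ 0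
  · have hc : (decide (width ≤ 0) || decide (height ≤ 0)) = true := by
      rcases hneg with h | h <;> simp [h]
    unfold fill_holes fill_holes_alt
    rw [if_pos hc, if_pos hc]
  · rw [not_or] at hneg
    obtain ⟨hw0, hh0⟩ := hneg
    have hwpos : 0 < width := by omega
    have hhpos : 0 < height := by omega
    obtain ⟨w', rfl⟩ : ∃ n : Nat, width = (n : Int) :=
      ⟨width.toNat, (Int.toNat_of_nonneg (by omega)).symm⟩
    obtain ⟨h', rfl⟩ : ∃ n : Nat, height = (n : Int) :=
      ⟨height.toNat, (Int.toNat_of_nonneg (by omega)).symm⟩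
    have hw' : 0 < w' := by exact_mod_cast hwpos
    have hh' : 0 < h' := by exact_mod_cast hhpos
    have hWn : ((↑w' * ↑h' : Int)).toNat = w' * h' := by
      have := pvCast_WW w' h'; omega
    have hlen : w' * h' ≤ mask.length := by
      rcases hpre with h | h | h
      · exact absurd h (by omega)
      · exact absurd h (by omega)
      · rw [hWn] at h; exact h.1
    have htail : ∀ b ∈ mask.drop (w' * h'), b = true := by
      rcases hpre with h | h | h
      · exact absurd h (by omega)
      · exact absurd h (by omega)
      · have h2 := h.2
        rw [hWn] at h2
        exact h2
    have hcne : ¬ ((decide ((↑w' : Int) ≤ 0) || decide ((↑h' : Int) ≤ 0)) = true) := by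
      have : (decide ((↑w' : Int) ≤ 0) || decide ((↑h' : Int) ≤ 0)) = false := by
        simp only [Bool.or_eq_false_iff, decide_eq_false_iff_not]
        constructor <;> omega
      rw [this]; exact Bool.false_ne_true
    unfold fill_holes fill_holes_alt
    rw [if_neg hcne, if_neg hcne]
    obtain ⟨hAlen, hAchar⟩ := pvVisited_char mask w' h' hw' hh'
    obtain ⟨hBlen, hBchar⟩ := pvReach_char mask w' h' hw' hh'
    have hagree : ∀ k, k < w' * h' →
        (fhBFS mask ↑w' ↑h'
            (2 * ((↑w' * ↑h' : Int)).toNat + (fhSeeds mask ↑w' ↑h').2.length)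
            (fhSeeds mask ↑w' ↑h')).getD k false
        = (fhIter mask ↑w' ↑h' (↑w' * ↑h') ((↑w' * ↑h' : Int).toNat + 1)
            (List.replicate ((↑w' * ↑h' : Int)).toNat false)).getD k false := by
      intro k hk
      have hiff := (hAchar k hk).trans (hBchar k hk).symm
      cases hA2 : (fhBFS mask ↑w' ↑h'
          (2 * ((↑w' * ↑h' : Int)).toNat + (fhSeeds mask ↑w' ↑h').2.length)
          (fhSeeds mask ↑w' ↑h')).getD k false with
      | true => exact (hiff.mp hA2).symm
      | false =>
        cases hB2 : (fhIter mask ↑w' ↑h' (↑w' * ↑h') ((↑w' * ↑h' : Int).toNat + 1)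
            (List.replicate ((↑w' * ↑h' : Int)).toNat false)).getD k false with
        | true =>
          rw [hiff.mpr hB2] at hA2
          exact absurd hA2 (by simp)
        | false => rfl
    exact pvFill_eq mask _ _ w' h' hlen htail hagree
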